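-- pv_equiv track=rewrite | github.com/nithilanimraka/CI_githubaction_test | src/github_utils.py | get_valid_lines
-- ===== SOURCE A (Python) =====
-- def get_valid_lines(diff_content):
--     """Parse diff to find valid line numbers in the new file version"""
--     valid_lines = {}
--     current_file = None
--     new_file_line = None  # Tracks line numbers in the new file
--     hunk_lines = 0  # Tracks number of lines processed in current hunk
--
--     for line in diff_content.split('\n'):
--         # Start of new file diff
--         if line.startswith('diff --git'):
--             current_file = line.split(' b/')[-1].split()[0]
--             valid_lines[current_file] = set()
--             new_file_line = None
--             hunk_lines = 0
--             continue
--
--         # Hunk header - format: @@ -old_start,old_lines +new_start,new_lines @@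
--         if line.startswith('@@'):
--             try:
--                 # Extract new file line information
--                 new_part = line.split('+')[1].split(' ', 1)[0]
--                 new_start = int(new_part.split(',')[0])
--                 new_file_line = new_start
--                 hunk_lines = 0
--                 valid_lines[current_file].add(new_file_line)
--             except (IndexError, ValueError):
--                 new_file_line = None
--             continue
--
--         if new_file_line is None:
--             continue  # Skip lines before valid hunk header
--
--         # Track line types
--         if line.startswith('+'):
--             # Added line - valid for commenting
--             valid_lines[current_file].add(new_file_line)
--             new_file_line += 1
--             hunk_lines += 1
--         elif line.startswith(' '):
--             # Context line - valid for commenting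
--             valid_lines[current_file].add(new_file_line)
--             new_file_line += 1
--             hunk_lines += 1
--         elif line.startswith('-'):
--             # Deleted line - only exists in old file, don't increment new line
--             hunk_lines += 1
--         else:
--             # Other diff control lines
--             continue
--
--     return valid_lines
-- ===== SOURCE B (Python) =====
-- def _parse_new_start(line):
--     parts = line.split('+')
--     if len(parts) < 2:
--         return None
--     new_part = parts[1].split(' ', 1)[0]
--     try:
--         return int(new_part.split(',')[0])
--     except ValueError:
--         return None
--
--
-- def _scan_hunks(body):
--     nums = set()
--     pos = None
--     for line in body:
--         if line.startswith('@@'):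
--             pos = _parse_new_start(line)
--             if pos is not None:
--                 nums.add(pos)
--         elif pos is not None:
--             if line.startswith('+') or line.startswith(' '):
--                 nums.add(pos)
--                 pos += 1
--     return nums
--
--
-- def _split_blocks(lines):
--     blocks = []
--     current = None
--     for line in lines:
--         if line.startswith('diff --git'):
--             fname = line.split(' b/')[-1].split()[0]
--             if current is not None:
--                 blocks.append(current)
--             current = (fname, [])
--         elif current is not None:
--             current[1].append(line)
--     if current is not None:
--         blocks.append(current)
--     return blocks
--
--
-- def get_valid_lines(diff_content):
--     valid_lines = {}
--     for fname, body in _split_blocks(diff_content.split('\n')):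
--         valid_lines[fname] = _scan_hunks(body)
--     return valid_lines
-- ===== Notes on version B (the rewrite author's own statement) =====
-- stated objective: simpler
-- what changed: A is a single pass with a dict/current_file/new_file_line state machine over all lines; B first splits the diff into per-file blocks at diff --git header lines, then scans each block's hunks independently with a small (set, position) scanner, writing one dict entry per block.
import Mathlib
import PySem

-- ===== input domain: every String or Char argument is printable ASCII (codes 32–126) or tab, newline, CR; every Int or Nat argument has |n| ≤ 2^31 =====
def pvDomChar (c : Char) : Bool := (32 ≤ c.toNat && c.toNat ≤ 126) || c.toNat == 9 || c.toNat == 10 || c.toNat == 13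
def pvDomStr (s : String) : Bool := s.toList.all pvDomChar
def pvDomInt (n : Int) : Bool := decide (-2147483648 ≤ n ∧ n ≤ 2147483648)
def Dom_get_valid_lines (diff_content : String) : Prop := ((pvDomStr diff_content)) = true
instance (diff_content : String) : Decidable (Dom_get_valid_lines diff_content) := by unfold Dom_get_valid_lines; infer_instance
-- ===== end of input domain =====

-- B re-decomposes A's single state-machine pass into: split the diff into per-file blocks, then scan
-- each block's hunks independently (objective: simpler decomposition, same O(n) cost).

-- filename extraction  line.split(` b/`)[-1].split()[0]  (shared verbatim by both Pythons);
-- none = Python's IndexError (excluded by Pre_)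
def fileName? (line : String) : Option String :=
  (PySem.Str.split₀ (((PySem.Str.split? line " b/").getD []).getLastD "")).head?

-- ===== PORT A =====
-- the try-block: new_part = line.split("+")[1].split(" ", 1)[0]; int(new_part.split(",")[0]);
-- none = the caught IndexError/ValueError
def aHunkStart? (line : String) : Option Int :=
  match ((PySem.Str.split? line "+").getD [])[1]? with
  | none => none
  | some p1 =>
    match ((PySem.Str.splitMax? p1 " " 1).getD []).head? with
    | none => none
    | some newPart =>
      match ((PySem.Str.split? newPart ",").getD []).head? with
      | none => none
      | some s0 => PySem.Int.ofStr? s0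

-- one iteration of A's for-loop; state = (valid_lines, current_file, new_file_line, hunk_lines).
-- Where the Python raises (KeyError on current_file = None, IndexError on a bad diff --git
-- filename) — both excluded by Pre_ — the port skips the line.
def stepA (st : PySem.Dict String (PySem.Set Int) × Option String × Option Int × Int)
    (line : String) : PySem.Dict String (PySem.Set Int) × Option String × Option Int × Int :=
  let (d, cf, nfl, h) := st
  if PySem.Str.startswith line "diff --git" then
    match fileName? line with
    | some f => (d.insert f PySem.Set.empty, some f, none, 0)
    | none => st
  else if PySem.Str.startswith line "@@" then
    match aHunkStart? line with
    | some n =>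
      match cf with
      | some f => (d.modify f PySem.Set.empty (fun s => PySem.Set.add s n), cf, some n, 0)
      | none => (d, cf, none, h)
    | none => (d, cf, none, h)
  else
    match nfl with
    | none => st
    | some n =>
      if PySem.Str.startswith line "+" then
        (match cf with
         | some f => d.modify f PySem.Set.empty (fun s => PySem.Set.add s n)
         | none => d, cf, some (n + 1), h + 1)
      else if PySem.Str.startswith line " " then
        (match cf with
         | some f => d.modify f PySem.Set.empty (fun s => PySem.Set.add s n)
         | none => d, cf, some (n + 1), h + 1)
      else if PySem.Str.startswith line "-" then
        (d, cf, nfl, h + 1)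
      else
        st

def get_valid_lines (diff_content : String) : List (String × List Int) :=
  (((PySem.Str.split? diff_content "\n").getD []).foldl stepA
    (PySem.Dict.empty, none, none, 0)).1.items

-- ===== PORT B =====
-- Source B _parse_new_start
def hunkStart? (line : String) : Option Int :=
  let parts := (PySem.Str.split? line "+").getD []
  if parts.length < 2 then none
  else
    let newPart := ((PySem.Str.splitMax? (parts.getD 1 "") " " 1).getD []).headD ""
    PySem.Int.ofStr? (((PySem.Str.split? newPart ",").getD []).headD "")

-- one iteration of Source B _scan_hunks; state = (nums, pos)
def scanStep (st : PySem.Set Int × Option Int) (line : String) : PySem.Set Int × Option Int :=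
  if PySem.Str.startswith line "@@" then
    match hunkStart? line with
    | some n => (PySem.Set.add st.1 n, some n)
    | none => (st.1, none)
  else
    match st.2 with
    | none => st
    | some n =>
      if PySem.Str.startswith line "+" || PySem.Str.startswith line " " then
        (PySem.Set.add st.1 n, some (n + 1))
      else
        st

def scanHunks (body : List String) : PySem.Set Int :=
  (body.foldl scanStep (PySem.Set.empty, none)).1

-- Source B _split_blocks loop (current block kept aside, appended on flush); a bad diff --git
-- filename (Python IndexError, excluded by Pre_) skips the line
def splitBlocksGo (blocks : List (String × List String)) (cur : Option (String × List String)) :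
    List String → List (String × List String)
  | [] =>
    match cur with
    | none => blocks
    | some c => blocks ++ [c]
  | l :: ls =>
    if PySem.Str.startswith l "diff --git" then
      match fileName? l with
      | some f =>
        splitBlocksGo (match cur with | none => blocks | some c => blocks ++ [c]) (some (f, [])) ls
      | none => splitBlocksGo blocks cur ls
    else
      match cur with
      | none => splitBlocksGo blocks none ls
      | some (f, body) => splitBlocksGo blocks (some (f, body ++ [l])) ls

-- Source B final loop: valid_lines[fname] = _scan_hunks(body)
def flushAll (blocks : List (String × List String)) : PySem.Dict String (PySem.Set Int) :=
  blocks.foldl (fun d p => d.insert p.1 (scanHunks p.2)) PySem.Dict.empty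

def get_valid_lines_alt (diff_content : String) : List (String × List Int) :=
  (flushAll (splitBlocksGo [] none ((PySem.Str.split? diff_content "\n").getD []))).items

-- ===== PRECONDITION & SPEC =====
-- Pre_ excludes exactly the inputs on which A raises: a parseable @@-hunk header before the first
-- diff --git line (KeyError: valid_lines[None]), and a diff --git line whose filename
-- extraction  line.split(` b/`)[-1].split()[0]  hits an empty list (IndexError).
def Pre_get_valid_lines (diff_content : String) : Prop :=
  (∀ l ∈ ((PySem.Str.split? diff_content "\n").getD []).takeWhile
      (fun l => !(PySem.Str.startswith l "diff --git")),
    PySem.Str.startswith l "@@" = true → hunkStart? l = none) ∧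
  (∀ l ∈ (PySem.Str.split? diff_content "\n").getD [],
    PySem.Str.startswith l "diff --git" = true → fileName? l ≠ none)

instance (diff_content : String) : Decidable (Pre_get_valid_lines diff_content) := by
  unfold Pre_get_valid_lines; infer_instance

def pvWitness_get_valid_lines : String :=
  "diff --git a/x b/y.py\n@@ -1,2 +3,4 @@\n+new\n ctx\n-old"

def Spec_get_valid_lines (diff_content : String) (out : List (String × List Int)) : Prop :=
  out = get_valid_lines_alt diff_content
instance (diff_content : String) (out : List (String × List Int)) :
    Decidable (Spec_get_valid_lines diff_content out) := by
  unfold Spec_get_valid_lines; infer_instance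

-- ===== CLAIM (what is proved, stated in full; the proofs are below) =====
def Claim_equal_get_valid_lines : Prop :=
  ∀ (diff_content : String), Dom_get_valid_lines diff_content →
    Pre_get_valid_lines diff_content →
    Spec_get_valid_lines diff_content (get_valid_lines diff_content)

-- ===== LEMMAS AND PROOFS =====

lemma modify_insert {κ ν : Type} [BEq κ] [LawfulBEq κ] (d : PySem.Dict κ ν) (k : κ) (v : ν) (dflt : ν) (f : ν → ν) :
    (d.insert k v).modify k dflt f = d.insert k (f v) := by
  simp [PySem.Dict.modify, PySem.Dict.getD_insert_self, PySem.Dict.insert_insert_self]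

lemma flushAll_concat (blocks : List (String × List String)) (c : String × List String) :
    flushAll (blocks ++ [c]) = (flushAll blocks).insert c.1 (scanHunks c.2) := by
  unfold flushAll; rw [List.foldl_append]; rfl

lemma parse_eq (l : String) : aHunkStart? l = hunkStart? l := by
  unfold aHunkStart? hunkStart?
  rcases hp : (PySem.Str.split? l "+").getD [] with _ | ⟨a, _ | ⟨b, t⟩⟩ <;> simp
  rcases hq : ((PySem.Str.splitMax? b " " 1).getD []) with _ | ⟨np, t2⟩ <;> simp
  · decide
  · rcases hr : ((PySem.Str.split? np ",").getD []) with _ | ⟨s0, t3⟩ <;> simp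
    decide

def mkA (blocks : List (String × List String)) (cur : Option (String × List String)) (h : Int) :
    PySem.Dict String (PySem.Set Int) × Option String × Option Int × Int :=
  match cur with
  | none => (flushAll blocks, none, none, h)
  | some (f, body) =>
    ((flushAll blocks).insert f (body.foldl scanStep (PySem.Set.empty, none)).1, some f,
      (body.foldl scanStep (PySem.Set.empty, none)).2, h)

lemma loop_eq (ls : List String) : ∀ (blocks : List (String × List String))
    (cur : Option (String × List String)) (h : Int),
    (ls.foldl stepA (mkA blocks cur h)).1 = flushAll (splitBlocksGo blocks cur ls) := by
  induction ls with
  | nil =>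
    intro blocks cur h
    cases cur with
    | none => simp [mkA, splitBlocksGo]
    | some c =>
      obtain ⟨f, body⟩ := c
      simp [mkA, splitBlocksGo, flushAll_concat, scanHunks]
  | cons l ls ih =>
    intro blocks cur h
    rw [List.foldl_cons]
    cases hd : PySem.Str.startswith l "diff --git" with
    | true =>
      simp at hd
      cases hf : fileName? l with
      | some f =>
        have h1 : stepA (mkA blocks cur h) l = mkA (match cur with | none => blocks | some c => blocks ++ [c]) (some (f, [])) 0 := by
          cases cur with
          | none => simp [stepA, mkA, hd, hf]
          | some c =>
            obtain ⟨g, body⟩ := c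
            simp [stepA, mkA, hd, hf, flushAll_concat, scanHunks]
        rw [h1, ih]
        simp [splitBlocksGo, hd, hf]
      | none =>
        have h1 : stepA (mkA blocks cur h) l = mkA blocks cur h := by
          cases cur with
          | none => simp [stepA, mkA, hd, hf]
          | some c => obtain ⟨g, body⟩ := c; simp [stepA, mkA, hd, hf]
        rw [h1, ih]
        simp [splitBlocksGo, hd, hf]
    | false =>
      simp at hd
      have hsb : splitBlocksGo blocks cur (l :: ls) = splitBlocksGo blocks
          (match cur with | none => none | some (f, body) => some (f, body ++ [l])) ls := by
        cases cur with
        | none => simp [splitBlocksGo, hd]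
        | some c => obtain ⟨f, body⟩ := c; simp [splitBlocksGo, hd]
      rw [hsb]
      cases cur with
      | none =>
        have h1 : stepA (mkA blocks none h) l = mkA blocks none h := by
          cases ha : PySem.Str.startswith l "@@" with
          | true =>
            simp at ha
            cases hn : aHunkStart? l with
            | some n => simp [stepA, mkA, hd, ha, hn]
            | none => simp [stepA, mkA, hd, ha, hn]
          | false =>
            simp at ha
            simp [stepA, mkA, hd, ha]
        rw [h1, ih]
      | some c =>
        obtain ⟨f, body⟩ := c
        have h1 : ∃ h', stepA (mkA blocks (some (f, body)) h) l =
            mkA blocks (some (f, body ++ [l])) h' := by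
          have hstep : (body ++ [l]).foldl scanStep (PySem.Set.empty, none)
              = scanStep (body.foldl scanStep (PySem.Set.empty, none)) l := by
            rw [List.foldl_append]; rfl
          cases ha : PySem.Str.startswith l "@@" with
          | true =>
            simp at ha
            cases hn : hunkStart? l with
            | some n =>
              exact ⟨0, by simp [stepA, mkA, hd, ha, parse_eq, hn, scanStep, modify_insert, PySem.Set.empty]⟩
            | none =>
              exact ⟨h, by simp [stepA, mkA, hd, ha, parse_eq, hn, scanStep, PySem.Set.empty]⟩
          | false =>
            simp at ha
            cases hpos : (body.foldl scanStep ((PySem.Set.empty : PySem.Set Int), none)).2 with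
            | none =>
              refine ⟨h, ?_⟩
              simp only [PySem.Set.empty] at hpos
              simp [stepA, mkA, hd, ha, hpos, scanStep, PySem.Set.empty]
            | some n =>
              simp only [PySem.Set.empty] at hpos
              cases hplus : PySem.Str.startswith l "+" with
              | true =>
                simp at hplus
                exact ⟨h + 1, by simp [stepA, mkA, hd, ha, hpos, hplus, scanStep, modify_insert, PySem.Set.empty]⟩
              | false =>
                simp at hplus
                cases hsp : PySem.Str.startswith l " " with
                | true =>
                  simp at hsp
                  exact ⟨h + 1, by simp [stepA, mkA, hd, ha, hpos, hplus, hsp, scanStep, modify_insert, PySem.Set.empty]⟩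
                | false =>
                  simp at hsp
                  cases hmin : PySem.Str.startswith l "-" with
                  | true =>
                    simp at hmin
                    exact ⟨h + 1, by simp [stepA, mkA, hd, ha, hpos, hplus, hsp, hmin, scanStep, PySem.Set.empty]⟩
                  | false =>
                    simp at hmin
                    exact ⟨h, by simp [stepA, mkA, hd, ha, hpos, hplus, hsp, hmin, scanStep, PySem.Set.empty]⟩
        obtain ⟨h', h1⟩ := h1
        rw [h1, ih]

-- ===== VERDICT (by name: the statement is the Claim_ definition above) =====
theorem get_valid_lines_spec : Claim_equal_get_valid_lines := by
  intro dc _ _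
  unfold Spec_get_valid_lines get_valid_lines get_valid_lines_alt
  exact congrArg PySem.Dict.items (loop_eq _ [] none 0)
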